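-- pv_equiv track=rewrite | github.com/jpreiss/unsplice | findcuts.py | cuts2clips
-- ===== SOURCE A (Python) =====
-- from collections import namedtuple
--
-- Clip = namedtuple('Clip', 'begin end')
--
-- def cuts2clips(begin, end, cuts, accept):
-- 	clips = []
-- 	tprev = begin
-- 	for t, acc in zip(cuts, accept):
-- 		if acc:
-- 			yield Clip(tprev, t)
-- 			tprev = t
-- 	yield Clip(tprev, end)
-- ===== SOURCE B (Python) =====
-- from collections import namedtuple
--
-- Clip = namedtuple('Clip', 'begin end')
--
-- def cuts2clips(begin, end, cuts, accept):
--     pts = [begin] + [t for t, acc in zip(cuts, accept) if acc] + [end]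
--     for a, b in zip(pts, pts[1:]):
--         yield Clip(a, b)
-- ===== Notes on version B (the rewrite author's own statement) =====
-- stated objective: simpler
-- what changed: Instead of streaming a tprev accumulator through one conditional loop, B first collects all boundaries [begin]+accepted cuts+[end] and then pairs consecutive boundaries with zip.
import Mathlib
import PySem

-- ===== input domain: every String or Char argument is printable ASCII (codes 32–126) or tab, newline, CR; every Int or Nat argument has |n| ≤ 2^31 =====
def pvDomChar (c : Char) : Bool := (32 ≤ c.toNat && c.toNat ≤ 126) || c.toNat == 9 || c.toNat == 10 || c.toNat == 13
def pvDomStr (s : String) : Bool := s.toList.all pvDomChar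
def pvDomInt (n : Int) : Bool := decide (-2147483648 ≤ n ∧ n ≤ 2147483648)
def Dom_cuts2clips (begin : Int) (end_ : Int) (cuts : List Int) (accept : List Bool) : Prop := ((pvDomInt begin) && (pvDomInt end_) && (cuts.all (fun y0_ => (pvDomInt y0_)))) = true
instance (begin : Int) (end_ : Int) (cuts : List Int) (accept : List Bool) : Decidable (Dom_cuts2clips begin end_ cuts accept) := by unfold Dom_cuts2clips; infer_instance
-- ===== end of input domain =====

-- B collects the boundary list [begin] ++ accepted cuts ++ [end] first and then pairs
-- consecutive boundaries, instead of A's single loop threading a tprev accumulator (simpler decomposition).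

-- ===== PORT A =====
-- A streams over zip(cuts, accept), yielding (tprev, t) and updating tprev at each accepted
-- cut, then yields the final (tprev, end). Ported as a foldl over the zipped list whose state
-- is (tprev, clips emitted so far), followed by appending the final clip.
def cuts2clips (begin : Int) (end_ : Int) (cuts : List Int) (accept : List Bool) : List (Int × Int) :=
  let s := (List.zip cuts accept).foldl
    (fun (s : Int × List (Int × Int)) (p : Int × Bool) =>
      if p.2 then (p.1, s.2 ++ [(s.1, p.1)]) else s)
    (begin, [])
  s.2 ++ [(s.1, end_)]

-- ===== PORT B =====
-- pts = [begin] + [t for t, acc in zip(cuts, accept) if acc] + [end]; then zip(pts, pts[1:]).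
def cuts2clips_alt (begin : Int) (end_ : Int) (cuts : List Int) (accept : List Bool) : List (Int × Int) :=
  let pts : List Int :=
    begin :: ((List.zip cuts accept).filterMap (fun p => if p.2 then some p.1 else none) ++ [end_])
  List.zip pts (pts.drop 1)

-- ===== PRECONDITION & SPEC =====
def Spec_cuts2clips (begin : Int) (end_ : Int) (cuts : List Int) (accept : List Bool) (out : List (Int × Int)) : Prop := out = cuts2clips_alt begin end_ cuts accept
instance (begin : Int) (end_ : Int) (cuts : List Int) (accept : List Bool) (out : List (Int × Int)) : Decidable (Spec_cuts2clips begin end_ cuts accept out) := by unfold Spec_cuts2clips; infer_instance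

-- ===== CLAIM (what is proved, stated in full; the proofs are below) =====
def Claim_equal_cuts2clips : Prop := ∀ (begin : Int) (end_ : Int) (cuts : List Int) (accept : List Bool), Dom_cuts2clips begin end_ cuts accept → Spec_cuts2clips begin end_ cuts accept (cuts2clips begin end_ cuts accept)

-- ===== LEMMAS AND PROOFS =====

-- Invariant of A's loop: starting from (t0, acc), the emitted clips followed by the final
-- clip equal acc followed by the consecutive pairing of t0 :: (accepted points ++ [e]).
theorem cuts2clips_fold_inv (e : Int) (l : List (Int × Bool)) :
    ∀ (t0 : Int) (acc : List (Int × Int)),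
    (let s := l.foldl
        (fun (s : Int × List (Int × Int)) (p : Int × Bool) =>
          if p.2 then (p.1, s.2 ++ [(s.1, p.1)]) else s) (t0, acc)
     s.2 ++ [(s.1, e)])
    = acc ++ (let rest := l.filterMap (fun p => if p.2 then some p.1 else none) ++ [e]
              List.zip (t0 :: rest) rest) := by
  induction l with
  | nil => intro t0 acc; simp
  | cons p l ih =>
    intro t0 acc
    by_cases hb : p.2 = true
    · simp only [List.foldl_cons, List.filterMap_cons, if_pos hb]
      have := ih p.1 (acc ++ [(t0, p.1)])
      simp only [List.zip] at this ⊢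
      simp [this]
    · simp only [List.foldl_cons, List.filterMap_cons, if_neg hb]
      simpa using ih t0 acc

-- ===== VERDICT (by name: the statement is the Claim_ definition above) =====
theorem cuts2clips_spec : Claim_equal_cuts2clips := by
  intro b e cuts accept _
  unfold Spec_cuts2clips cuts2clips cuts2clips_alt
  have := cuts2clips_fold_inv e (List.zip cuts accept) b []
  simpa using this
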